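-- pv_equiv track=rewrite | github.com/Gozel-Jorayeva/Python_for_DQE | hometask_4_second_try.py | choose_random_values
-- ===== SOURCE A (Python) =====
-- def choose_random_values(rand_num):
--     result, dict_two = {}, {}
--     for i in rand_num:
--         for key, value in i.items():
--             if key in dict_two:
--                 dict_two[key]['count'] += 1
--                 if dict_two[key]['value'] < value:
--                     dict_two[key]['value'] = value
--                     dict_two[key]['max_index'] = dict_two[key]['count']
--             else:
--                 dict_two[key] = {'value': value, 'count': 1, 'max_index': 1}
--
--     for k, v in dict_two.items():
--         value_count = v['count']
--         max_index = v['max_index']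
--         if value_count == 1:
--             result_key = f'{k}'
--         else:
--             result_key = f'{k}_{max_index}'
--         result[result_key] = v['value']
--     return result
-- ===== SOURCE B (Python) =====
-- def choose_random_values(rand_num):
--     # gather-then-reduce: group values per key, then compute max/count/first-max-index per key
--     groups = {}
--     for i in rand_num:
--         for key, value in i.items():
--             groups.setdefault(key, []).append(value)
--     result = {}
--     for k, values in groups.items():
--         m = max(values)
--         if len(values) == 1:
--             result[k] = m
--         else:
--             result[f'{k}_{values.index(m) + 1}'] = m
--     return result
-- ===== Notes on version B (the rewrite author's own statement) =====
-- stated objective: simpler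
-- what changed: Replaces the incremental per-key running-max/count/max_index bookkeeping with a gather-then-reduce: one pass groups each key's values into a list, then a second pass computes max(values), len(values) and values.index(max)+1 per key.
import Mathlib
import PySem

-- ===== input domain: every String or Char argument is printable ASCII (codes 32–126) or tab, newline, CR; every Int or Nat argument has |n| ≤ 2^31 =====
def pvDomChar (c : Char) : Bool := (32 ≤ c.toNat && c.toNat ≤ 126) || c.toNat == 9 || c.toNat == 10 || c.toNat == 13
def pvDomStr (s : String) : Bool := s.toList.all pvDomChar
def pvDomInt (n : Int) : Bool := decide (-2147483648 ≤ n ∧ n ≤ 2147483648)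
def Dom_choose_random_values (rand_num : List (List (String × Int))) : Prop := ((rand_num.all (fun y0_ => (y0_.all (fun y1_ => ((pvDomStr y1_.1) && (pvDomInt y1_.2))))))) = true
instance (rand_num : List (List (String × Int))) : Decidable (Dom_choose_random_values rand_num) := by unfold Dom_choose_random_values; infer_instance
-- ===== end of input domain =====

-- B replaces A's incremental per-key (value, count, max_index) bookkeeping with a gather-then-reduce
-- pass (group each key's values into a list, then take max/len/index of first max); objective: simpler.

-- ===== PORT A =====
-- A's inner dict {'value': …, 'count': …, 'max_index': …} is ported as the triple (value, count, max_index).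
-- 'key in dict_two' + field access is the match on get?; each inner list stands for a Python dict (PySem.Dict.ofList).
def stepA (d : PySem.Dict String (Int × Int × Int)) (p : String × Int) : PySem.Dict String (Int × Int × Int) :=
  match d.get? p.1 with
  | some (mv, c, mi) =>
      if mv < p.2 then d.insert p.1 (p.2, c + 1, c + 1) else d.insert p.1 (mv, c + 1, mi)
  | none => d.insert p.1 (p.2, 1, 1)

def choose_random_values (rand_num : List (List (String × Int))) : List (String × Int) :=
  let dict_two := rand_num.foldl (fun d i => (PySem.Dict.ofList i).items.foldl stepA d) PySem.Dict.empty
  let result := dict_two.items.foldl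
    (fun r kv =>
      r.insert (if kv.2.2.1 == 1 then kv.1 else kv.1 ++ "_" ++ PySem.Int.toStr kv.2.2.2) kv.2.1)
    PySem.Dict.empty
  result.items

-- ===== PORT B =====
-- groups.setdefault(key, []).append(value) is modify key [] (· ++ [value])
def stepB (g : PySem.Dict String (List Int)) (p : String × Int) : PySem.Dict String (List Int) :=
  g.modify p.1 [] (fun vs => vs ++ [p.2])

def reduceB (r : PySem.Dict String Int) (kv : String × List Int) : PySem.Dict String Int :=
  match PySem.List.max? kv.2 (fun y => y) with
  | some m =>
      if kv.2.length == 1 then r.insert kv.1 m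
      else r.insert (kv.1 ++ "_" ++ PySem.Int.toStr (((PySem.List.index? kv.2 m).getD 0 : Int) + 1)) m
  | none => r  -- unreachable totality guard: every grouped list is nonempty

def choose_random_values_alt (rand_num : List (List (String × Int))) : List (String × Int) :=
  let groups := rand_num.foldl (fun g i => (PySem.Dict.ofList i).items.foldl stepB g) PySem.Dict.empty
  let result := groups.items.foldl reduceB PySem.Dict.empty
  result.items

-- ===== PRECONDITION & SPEC =====
def Spec_choose_random_values (rand_num : List (List (String × Int))) (out : List (String × Int)) : Prop := out = choose_random_values_alt rand_num
instance (rand_num : List (List (String × Int))) (out : List (String × Int)) : Decidable (Spec_choose_random_values rand_num out) := by unfold Spec_choose_random_values; infer_instance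

-- ===== CLAIM (what is proved, stated in full; the proofs are below) =====
def Claim_equal_choose_random_values : Prop := ∀ (rand_num : List (List (String × Int))), Dom_choose_random_values rand_num → Spec_choose_random_values rand_num (choose_random_values rand_num)

-- ===== LEMMAS AND PROOFS =====

-- the value A's step stores at key p.1
def valA (d : PySem.Dict String (Int × Int × Int)) (p : String × Int) : Int × Int × Int :=
  match d.get? p.1 with
  | some (mv, c, mi) => if mv < p.2 then (p.2, c + 1, c + 1) else (mv, c + 1, mi)
  | none => (p.2, 1, 1)

-- per-key transition of A's statistics
def step1 (o : Option (Int × Int × Int)) (v : Int) : Option (Int × Int × Int) :=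
  match o with
  | none => some (v, 1, 1)
  | some (mv, c, mi) => some (if mv < v then (v, c + 1, c + 1) else (mv, c + 1, mi))

theorem stepA_eq (d : PySem.Dict String (Int × Int × Int)) (p : String × Int) :
    stepA d p = d.insert p.1 (valA d p) := by
  unfold stepA valA
  rcases h : d.get? p.1 with _ | ⟨mv, c, mi⟩
  · rfl
  · simp only []
    split_ifs <;> rfl

theorem step1_get (d : PySem.Dict String (Int × Int × Int)) (p : String × Int) :
    step1 (d.get? p.1) p.2 = some (valA d p) := by
  unfold step1 valA
  rcases h : d.get? p.1 with _ | ⟨mv, c, mi⟩ <;> rfl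

theorem getA (k : String) : ∀ (ps : List (String × Int)) (d : PySem.Dict String (Int × Int × Int)),
    (ps.foldl stepA d).get? k = ((ps.filter (fun p => p.1 == k)).map (·.2)).foldl step1 (d.get? k)
  | [], d => rfl
  | p :: rest, d => by
    rw [List.foldl_cons, getA k rest (stepA d p), stepA_eq, List.filter_cons]
    by_cases h : p.1 = k
    · subst h
      simp [PySem.Dict.get?_insert_self, step1_get]
    · rw [PySem.Dict.get?_insert_of_ne _ _ (fun hk => h hk.symm)]
      simp [h]

theorem runStats_spec (v : Int) (t : List Int) :
    (v :: t).foldl step1 none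
      = some (t.foldl max v, (t.length : Int) + 1,
          (((PySem.List.index? (v :: t) (t.foldl max v)).getD 0 : Int) + 1)) := by
  induction t using List.reverseRecOn with
  | nil => simp [step1]
  | append_singleton t y ih =>
    have hcons : v :: (t ++ [y]) = (v :: t) ++ [y] := rfl
    rw [hcons, List.foldl_append, ih, List.foldl_append]
    have hle := PySem.List.le_foldl_max t v
    by_cases h : t.foldl max v < y
    · have hnot : y ∉ v :: t := by
        intro hy
        rcases List.mem_cons.mp hy with rfl | hy
        · exact absurd (lt_of_le_of_lt hle.1 h) (lt_irrefl y)
        · exact absurd (lt_of_le_of_lt (hle.2 y hy) h) (lt_irrefl y)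
      have hmax : max (t.foldl max v) y = y := max_eq_right (le_of_lt h)
      simp only [List.foldl_cons, List.foldl_nil, step1, h, if_pos, hmax,
        PySem.List.index?_append_singleton_self _ _ hnot]
      simp
    · have hmem : t.foldl max v ∈ v :: t := by
        rcases PySem.List.foldl_max_mem t v with h' | h'
        · rw [h']; exact List.mem_cons_self
        · exact List.mem_cons_of_mem _ h'
      have hmax : max (t.foldl max v) y = t.foldl max v := max_eq_left (le_of_not_gt h)
      simp only [List.foldl_cons, List.foldl_nil, step1, hmax,
        PySem.List.index?_append_of_mem _ hmem]
      simp [h]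

theorem foldl_stepA_eq (l : List (String × Int)) (d : PySem.Dict String (Int × Int × Int)) :
    l.foldl stepA d = l.foldl (fun d p => d.insert p.1 (valA d p)) d :=
  PySem.List.foldl_congr_mem l _ _ d (fun acc x _ => stepA_eq acc x)

theorem core_eq (ps : List (String × Int)) :
    ((ps.foldl stepA PySem.Dict.empty).items.foldl
      (fun r kv =>
        r.insert (if kv.2.2.1 == 1 then kv.1 else kv.1 ++ "_" ++ PySem.Int.toStr kv.2.2.2) kv.2.1)
      PySem.Dict.empty).items
    = ((ps.foldl stepB PySem.Dict.empty).items.foldl reduceB PySem.Dict.empty).items := by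
  have hBfold : ps.foldl stepB PySem.Dict.empty
      = ps.foldl (fun g p => g.modify p.1 [] (fun vs => vs ++ [p.2])) PySem.Dict.empty := rfl
  have hnA : (ps.foldl stepA PySem.Dict.empty).keys.Nodup := by
    rw [foldl_stepA_eq]
    exact PySem.Dict.nodup_keys_foldl_insert_key ps Prod.fst valA _ (by simp)
  have hnB : (ps.foldl stepB PySem.Dict.empty).keys.Nodup := by
    rw [hBfold]
    exact PySem.Dict.nodup_keys_foldl_modify_key ps Prod.fst [] (fun g p vs => vs ++ [p.2]) _ (by simp)
  have hkA : (ps.foldl stepA PySem.Dict.empty).keys = PySem.Set.ofList (ps.map Prod.fst) := by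
    rw [foldl_stepA_eq, PySem.Dict.keys_foldl_insert_key ps Prod.fst valA]
    simp [PySem.Set.update_nil_left]
  have hkB : (ps.foldl stepB PySem.Dict.empty).keys = PySem.Set.ofList (ps.map Prod.fst) := by
    rw [hBfold, PySem.Dict.keys_foldl_modify_key ps Prod.fst [] (fun g p vs => vs ++ [p.2])]
    simp [PySem.Set.update_nil_left]
  rw [PySem.Dict.items_eq_map_keys _ hnA (0, 0, 0), PySem.Dict.items_eq_map_keys _ hnB [],
    hkA, hkB, List.foldl_map, List.foldl_map]
  refine congrArg PySem.Dict.items (PySem.List.foldl_congr_mem _ _ _ _ ?_)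
  intro acc k hk
  have hkmem : k ∈ ps.map Prod.fst := (PySem.Set.mem_ofList _ _).mp hk
  obtain ⟨p, hp, hpk⟩ := List.mem_map.mp hkmem
  have hvmem : p.2 ∈ (ps.filter (fun q => q.1 == k)).map (·.2) :=
    List.mem_map.mpr ⟨p, List.mem_filter.mpr ⟨hp, by simp [hpk]⟩, rfl⟩
  obtain ⟨v, t, hvt⟩ : ∃ v t, (ps.filter (fun q => q.1 == k)).map (·.2) = v :: t := by
    rcases hx : (ps.filter (fun q => q.1 == k)).map (·.2) with _ | ⟨v, t⟩
    · rw [hx] at hvmem; cases hvmem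
    · exact ⟨v, t, hx⟩
  have hBk : (ps.foldl stepB PySem.Dict.empty).getD k [] = v :: t := by
    rw [hBfold, PySem.Dict.getD_foldl_modify_append ps PySem.Dict.empty k]
    simpa using hvt
  have hAk : (ps.foldl stepA PySem.Dict.empty).getD k (0, 0, 0)
      = (t.foldl max v, (t.length : Int) + 1,
          (((PySem.List.index? (v :: t) (t.foldl max v)).getD 0 : Int) + 1)) := by
    rw [PySem.Dict.getD_eq_get?_getD, getA k ps PySem.Dict.empty]
    simp only [PySem.Dict.get?_empty]
    rw [hvt, runStats_spec]
    rfl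
  rw [hAk, hBk]
  simp only [reduceB, PySem.List.max?_id_cons]
  rcases t with _ | ⟨a, t'⟩
  · simp
  · have hlen : ((((a :: t').length : Int) + 1) == (1 : Int)) = false := by
      simp only [List.length_cons, beq_eq_false_iff_ne, ne_eq]
      push_cast
      omega
    have hlen' : (((v :: a :: t').length) == 1) = false := by simp
    simp only [hlen, hlen', if_false, Bool.false_eq_true]

theorem main_eq (rn : List (List (String × Int))) :
    choose_random_values rn = choose_random_values_alt rn := by
  simp only [choose_random_values, choose_random_values_alt]
  rw [← List.foldl_flatMap, ← List.foldl_flatMap]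
  exact core_eq _

theorem choose_random_values_spec : Claim_equal_choose_random_values := by
  intro rn _
  unfold Spec_choose_random_values
  exact main_eq rn
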